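-- pv_equiv track=rewrite | github.com/matheusknaul/scrapy-scope | app/standards/padroes.py | set_interval
-- ===== SOURCE A (Python) =====
-- def set_interval(list_results, text):
--     lista_ordenada = sort_list(list_results)
--     result = []
--
--     for i, norma_atual in enumerate(lista_ordenada):
--         start_norma_atual = norma_atual[1][0]
--         nome_norma_atual = norma_atual[0]
--
--         # Determina o intervalo do texto anterior à norma atual
--         if i == 0:
--             # Se for a primeira norma, pegue o texto desde o início
--             bloco_anterior = text[:start_norma_atual].strip()
--         else:
--             # Pegue o texto desde o final da norma anterior até o início da norma atual
--             end_norma_anterior = lista_ordenada[i-1][1][1]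
--             bloco_anterior = text[end_norma_anterior:start_norma_atual].strip()
--
--         # Adiciona o bloco de texto e a norma à lista de resultados
--         result.append([bloco_anterior, nome_norma_atual])
--
--     return result
--
-- def sort_list(list_results):
--     lista_ordenada = sorted(list_results, key=lambda x: x[1][0])
--     return lista_ordenada
-- ===== SOURCE B (Python) =====
-- def set_interval(list_results, text):
--     remaining = list(list_results)
--     result = []
--     prev_end = 0
--     while remaining:
--         norma = min(remaining, key=lambda x: x[1][0])
--         remaining.remove(norma)
--         result.append([text[prev_end:norma[1][0]].strip(), norma[0]])
--         prev_end = norma[1][1]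
--     return result
-- ===== Notes on version B (the rewrite author's own statement) =====
-- stated objective: alternative
-- what changed: Removes the sort entirely: B repeatedly selects and removes the minimum-start norm from the remaining pool (selection order equals the stable sorted order) while threading a running prev_end accumulator, instead of A's sorted() followed by an enumerate pass that back-indexes the sorted list with an i==0 special case.
-- outside the precondition, e.g. on set_interval([('a', [3])], 'hello'): A returns [['hel', 'a']], B raises IndexError
import Mathlib
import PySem

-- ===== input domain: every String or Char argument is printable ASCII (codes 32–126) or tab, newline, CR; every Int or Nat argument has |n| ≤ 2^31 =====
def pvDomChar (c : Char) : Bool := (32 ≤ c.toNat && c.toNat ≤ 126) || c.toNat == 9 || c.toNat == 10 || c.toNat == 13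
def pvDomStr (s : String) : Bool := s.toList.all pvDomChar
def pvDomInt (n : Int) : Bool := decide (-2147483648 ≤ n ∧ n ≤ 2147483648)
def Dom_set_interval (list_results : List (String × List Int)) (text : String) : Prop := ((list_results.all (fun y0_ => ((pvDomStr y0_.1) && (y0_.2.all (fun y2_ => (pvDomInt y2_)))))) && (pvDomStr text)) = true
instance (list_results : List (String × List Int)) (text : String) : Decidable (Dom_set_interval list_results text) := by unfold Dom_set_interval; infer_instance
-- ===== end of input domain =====

-- B drops A's sort: it repeatedly selects and removes the minimum-start norm from the
-- remaining pool while threading a running prev_end accumulator (objective: alternative).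

-- ===== PORT A =====
-- helper sort_list of A
def sort_list (list_results : List (String × List Int)) : List (String × List Int) :=
  PySem.List.sorted list_results (fun x => PySem.List.pyGetD x.2 0 0) false

def set_interval (list_results : List (String × List Int)) (text : String) : List (List String) :=
  let lista_ordenada := sort_list list_results
  (PySem.List.enumerate lista_ordenada 0).foldl
    (fun result p =>
      let i := p.1
      let norma_atual := p.2
      let start_norma_atual := PySem.List.pyGetD norma_atual.2 0 0
      let nome_norma_atual := norma_atual.1
      let bloco_anterior :=
        if i == 0 then
          PySem.Str.strip (PySem.Str.slice text none (some start_norma_atual))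
        else
          let end_norma_anterior :=
            PySem.List.pyGetD (PySem.List.pyGetD lista_ordenada (i - 1) ("", [])).2 1 0
          PySem.Str.strip (PySem.Str.slice text (some end_norma_anterior) (some start_norma_atual))
      result ++ [[bloco_anterior, nome_norma_atual]]) []

-- ===== PORT B =====
-- The while loop of Source B as a recursion on `remaining`: min? = none is exactly the
-- `while remaining:` exit (Python's min raises only on the empty pool, excluded by Pre_);
-- `remaining.remove(norma)` is PySem.List.remove? (always `some` here, as norma ∈ remaining).
def set_interval_alt_loop (text : String) (remaining : List (String × List Int))
    (result : List (List String)) (prev_end : Int) : List (List String) :=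
  match h : PySem.List.min? remaining (fun x => PySem.List.pyGetD x.2 0 0) with
  | none => result
  | some norma =>
    set_interval_alt_loop text ((PySem.List.remove? remaining norma).getD remaining)
      (result ++ [[PySem.Str.strip (PySem.Str.slice text (some prev_end)
         (some (PySem.List.pyGetD norma.2 0 0))), norma.1]])
      (PySem.List.pyGetD norma.2 1 0)
termination_by remaining.length
decreasing_by
  have hm : norma ∈ remaining := PySem.List.min?_mem h
  rw [PySem.List.remove?_eq_some_erase _ _ hm]
  simpa [List.length_erase_of_mem hm] using Nat.sub_lt (List.length_pos_of_mem hm) one_pos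

def set_interval_alt (list_results : List (String × List Int)) (text : String) : List (List String) :=
  set_interval_alt_loop text list_results [] 0

-- ===== PRECONDITION & SPEC =====
-- Pre_ excludes inputs where some interval has fewer than 2 endpoints: A raises IndexError on
-- almost all of them (empty interval in the sort key, or a short interval read back as the
-- predecessor's end); only when the single short interval is the last in sorted order does A
-- still return, and there B's selection loop naturally raises IndexError reading its end.
def Pre_set_interval (list_results : List (String × List Int)) (text : String) : Prop :=
  ∀ p ∈ list_results, 2 ≤ p.2.length
instance (list_results : List (String × List Int)) (text : String) : Decidable (Pre_set_interval list_results text) := by unfold Pre_set_interval; infer_instance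

def pvWitness_set_interval : (List (String × List Int)) × String := ([("a", [1, 3])], "hello")

def Spec_set_interval (list_results : List (String × List Int)) (text : String) (out : List (List String)) : Prop := out = set_interval_alt list_results text
instance (list_results : List (String × List Int)) (text : String) (out : List (List String)) : Decidable (Spec_set_interval list_results text out) := by unfold Spec_set_interval; infer_instance

-- ===== CLAIM (what is proved, stated in full; the proofs are below) =====
def Claim_equal_set_interval : Prop := ∀ (list_results : List (String × List Int)) (text : String), Dom_set_interval list_results text → Pre_set_interval list_results text → Spec_set_interval list_results text (set_interval list_results text)

-- ===== LEMMAS AND PROOFS =====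

/-- The common shape both programs compute: blocks of `text` between a running previous end
and each norm's start, paired with the norm's name, in minimum-start-first order. -/
def pvBlocks (text : String) : List (String × List Int) → Int → List (List String)
  | [], _ => []
  | p :: t, prev =>
    [PySem.Str.strip (PySem.Str.slice text (some prev) (some (PySem.List.pyGetD p.2 0 0))), p.1]
      :: pvBlocks text t (PySem.List.pyGetD p.2 1 0)

theorem pvSlice_zero (text : String) (b : Option Int) :
    PySem.Str.slice text (some 0) b = PySem.Str.slice text none b := by
  simp [PySem.Str.slice]

theorem pvGetD_append_last {α : Type} (pre : List α) (rest : List α) (d : α)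
    (h : pre ≠ []) : (pre ++ rest).getD (pre.length - 1) d = pre.getLast h := by
  have hl : 0 < pre.length := List.length_pos_iff.mpr h
  have hlt : pre.length - 1 < pre.length := by omega
  rw [List.getD_eq_getElem _ _ (by simp [List.length_append]; omega),
    List.getElem_append_left hlt, List.getLast_eq_getElem]

/-- Running minimum over one more element at the right end. -/
theorem pvMin_append_singleton {α : Type} (key : α → Int) (ys : List α) (z : α) :
    PySem.List.min? (ys ++ [z]) key
      = match PySem.List.min? ys key with
        | none => some z
        | some m => if key z < key m then some z else some m := by
  simp only [PySem.List.min?, List.foldl_append, List.foldl]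
  cases List.foldl (fun acc x => match acc with
      | none => some x
      | some m => if key x < key m then some x else some m) (none : Option α) ys <;> rfl

/-- Sorting one more element appended on the right inserts it into the sorted prefix. -/
theorem pvSorted_append_singleton {α : Type} (key : α → Int) (ys : List α) (z : α) :
    PySem.List.sorted (ys ++ [z]) key false
      = PySem.List.insertBy (fun a b => decide (key a < key b)) z
          (PySem.List.sorted ys key false) := by
  rw [PySem.List.sorted_eq_foldl_insertBy, PySem.List.sorted_eq_foldl_insertBy,
    List.foldl_append, List.foldl]
  simp [List.foldl_nil]

/-- SELECTION = STABLE SORT: the first minimum-key element heads the sorted list, and the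
sorted rest is the sorted list with that occurrence erased. -/
theorem pvSorted_cons_min {α : Type} [BEq α] [LawfulBEq α] (key : α → Int) (xs : List α) (m : α)
    (h : PySem.List.min? xs key = some m) :
    PySem.List.sorted xs key false = m :: PySem.List.sorted (xs.erase m) key false := by
  induction xs using List.reverseRecOn with
  | nil => simp [PySem.List.min?] at h
  | append_singleton ys z ih =>
    rw [pvMin_append_singleton] at h
    cases hys : PySem.List.min? ys key with
    | none =>
      have hysnil : ys = [] := (PySem.List.min?_eq_none_iff _ _).mp hys
      rw [hys] at h
      simp only [Option.some.injEq] at h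
      subst hysnil; subst h
      simp [PySem.List.sorted, PySem.List.insertBy]
    | some m' =>
      rw [hys] at h
      simp only at h
      by_cases hlt : key z < key m'
      · rw [if_pos hlt] at h
        simp only [Option.some.injEq] at h
        subst h
        have hzni : z ∉ ys := by
          intro hz
          exact absurd (PySem.List.min?_isMin hys z hz) (by omega)
        rw [List.erase_append_right _ hzni]
        simp only [List.erase_cons_head, List.append_nil]
        rw [pvSorted_append_singleton]
        have hysne : ys ≠ [] := by
          intro hn; rw [hn] at hys; simp [PySem.List.min?] at hys
        cases hs : PySem.List.sorted ys key false with
        | nil => exact absurd ((PySem.List.sorted_eq_nil_iff _ _ _).mp hs) hysne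
        | cons h₁ t =>
          have hh₁ : h₁ ∈ ys := (PySem.List.mem_sorted _ _ _ _).mp (by rw [hs]; exact List.mem_cons_self)
          have : key z < key h₁ := lt_of_lt_of_le hlt (PySem.List.min?_isMin hys h₁ hh₁)
          simp [PySem.List.insertBy, this]
      · rw [if_neg hlt] at h
        simp only [Option.some.injEq] at h
        subst h
        have hm : m' ∈ ys := PySem.List.min?_mem hys
        rw [List.erase_append_left _ hm, pvSorted_append_singleton, ih hys,
          pvSorted_append_singleton]
        simp [PySem.List.insertBy, hlt]

/-- B's selection loop equals `pvBlocks` over the sorted list. -/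
theorem pvB_loop (text : String) (s : List (String × List Int))
    (acc : List (List String)) (prev : Int) :
    set_interval_alt_loop text s acc prev
      = acc ++ pvBlocks text (PySem.List.sorted s (fun x => PySem.List.pyGetD x.2 0 0) false) prev := by
  induction hn : s.length using Nat.strong_induction_on generalizing s acc prev with
  | _ n ih =>
    rw [set_interval_alt_loop.eq_def]
    split
    next h =>
      have : s = [] := (PySem.List.min?_eq_none_iff _ _).mp h
      subst this
      simp [PySem.List.sorted, pvBlocks]
    next m h =>
      have hm : m ∈ s := PySem.List.min?_mem h
      have herase : (PySem.List.remove? s m).getD s = s.erase m := by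
        rw [PySem.List.remove?_eq_some_erase _ _ hm]; rfl
      have hlen : (s.erase m).length < n := by
        rw [List.length_erase_of_mem hm] at *
        have := List.length_pos_of_mem hm
        omega
      rw [herase, ih _ hlen _ _ _ rfl, pvSorted_cons_min _ _ _ h]
      simp only [pvBlocks, List.append_assoc, List.singleton_append]

/-- A's fold over the enumerated suffix equals `pvBlocks`, with the previous end carried
explicitly: `full = pre ++ t`, the enumerate counter is `pre.length`, and `prev` is 0 for
the first position and the predecessor's `[1][1]` afterwards. -/
theorem pvA_loop (text : String) (full : List (String × List Int)) :
    ∀ (t pre : List (String × List Int)) (prev : Int), full = pre ++ t →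
    (pre = [] → prev = 0) →
    (∀ h : pre ≠ [], prev = PySem.List.pyGetD (pre.getLast h).2 1 0) →
    ∀ (acc : List (List String)),
    ((PySem.List.enumerate t (pre.length : Int)).foldl
      (fun result p =>
        let i := p.1
        let norma_atual := p.2
        let start_norma_atual := PySem.List.pyGetD norma_atual.2 0 0
        let nome_norma_atual := norma_atual.1
        let bloco_anterior :=
          if i == 0 then
            PySem.Str.strip (PySem.Str.slice text none (some start_norma_atual))
          else
            let end_norma_anterior :=
              PySem.List.pyGetD (PySem.List.pyGetD full (i - 1) ("", [])).2 1 0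
            PySem.Str.strip (PySem.Str.slice text (some end_norma_anterior) (some start_norma_atual))
        result ++ [[bloco_anterior, nome_norma_atual]]) acc)
      = acc ++ pvBlocks text t prev := by
  intro t
  induction t with
  | nil => intro pre prev _ _ _ acc; simp [PySem.List.enumerate, pvBlocks]
  | cons x t ih =>
    intro pre prev hfull h0 hlast acc
    rw [PySem.List.enumerate_cons]
    simp only [List.foldl_cons]
    have hhead :
        (if ((pre.length : Int)) == 0 then
            PySem.Str.strip (PySem.Str.slice text none (some (PySem.List.pyGetD x.2 0 0)))
          else
            PySem.Str.strip (PySem.Str.slice text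
              (some (PySem.List.pyGetD
                (PySem.List.pyGetD full ((pre.length : Int) - 1) ("", [])).2 1 0))
              (some (PySem.List.pyGetD x.2 0 0))))
        = PySem.Str.strip (PySem.Str.slice text (some prev) (some (PySem.List.pyGetD x.2 0 0))) := by
      by_cases hpre : pre = []
      · subst hpre
        simp [h0 rfl, pvSlice_zero]
      · have hlen : pre.length ≠ 0 := by simpa [List.length_eq_zero_iff] using hpre
        have hne : ((pre.length : Int)) ≠ 0 := by exact_mod_cast hlen
        rw [if_neg (by simpa using hne)]
        have hcast : (pre.length : Int) - 1 = ((pre.length - 1 : Nat) : Int) := by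
          omega
        rw [hcast, PySem.List.pyGetD_natCast, hfull,
          pvGetD_append_last pre _ _ hpre, ← hlast hpre]
    rw [hhead]
    have hrec := ih (pre ++ [x]) (PySem.List.pyGetD x.2 1 0)
      (by simp [hfull]) (by simp) (by intro _; simp)
      (acc ++ [[PySem.Str.strip (PySem.Str.slice text (some prev)
        (some (PySem.List.pyGetD x.2 0 0))), x.1]])
    simp only [List.length_append, List.length_singleton, Nat.cast_add, Nat.cast_one] at hrec
    rw [hrec]
    simp [pvBlocks]

-- ===== VERDICT (by name: the statement is the Claim_ definition above) =====
theorem set_interval_spec : Claim_equal_set_interval := by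
  intro list_results text _ _
  unfold Spec_set_interval set_interval set_interval_alt sort_list
  rw [pvB_loop]
  have := pvA_loop text
    (PySem.List.sorted list_results (fun x => PySem.List.pyGetD x.2 0 0) false)
    (PySem.List.sorted list_results (fun x => PySem.List.pyGetD x.2 0 0) false)
    [] 0 (by simp) (fun _ => rfl) (fun h => absurd rfl h) []
  simpa using this
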